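-- pv_equiv track=rewrite | github.com/Ausar0109/con_yuqing | con_yuqing/yqcore.py | words_rule
-- ===== SOURCE A (Python) =====
-- def find_word(sstr, wword):
--     if '_' in wword:
--         return sstr.find(wword[1:])
--     else:
--         return sstr.find(wword)
--
-- def words_rule(wordss, dfcol):
--     word_sp_col = dfcol.split('-')
--     word_sp_find = [find_word(wordss, i) for i in word_sp_col]
--
--     nn = -1
--     for wor, posi in zip(word_sp_col, word_sp_find):
--         if ('_' in wor) and (posi != -1):
--             return 0
--         elif '_' not in wor:
--             if nn < posi:
--                 nn = posi
--             else:
--                 return 0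
--     return 1
-- ===== SOURCE B (Python) =====
-- def words_rule(wordss, dfcol):
--     tokens = dfcol.split('-')
--     # reject outright if any negated word actually occurs
--     if any('_' in t and wordss.find(t[1:]) != -1 for t in tokens):
--         return 0
--     pos = [wordss.find(t) for t in tokens if '_' not in t]
--     # accepted iff the positions are strictly increasing (= equal to the
--     # sorted set of themselves) and every word was found (no -1)
--     return 1 if pos == sorted(set(pos)) and -1 not in pos else 0
-- ===== Notes on version B (the rewrite author's own statement) =====
-- stated objective: simpler
-- what changed: Replaces A's stateful accumulator loop with early returns by a stateless characterization: reject if any negated word occurs, then accept iff the positive-word position list equals sorted(set(itself)) (i.e. is strictly increasing) and contains no -1.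
import Mathlib
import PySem

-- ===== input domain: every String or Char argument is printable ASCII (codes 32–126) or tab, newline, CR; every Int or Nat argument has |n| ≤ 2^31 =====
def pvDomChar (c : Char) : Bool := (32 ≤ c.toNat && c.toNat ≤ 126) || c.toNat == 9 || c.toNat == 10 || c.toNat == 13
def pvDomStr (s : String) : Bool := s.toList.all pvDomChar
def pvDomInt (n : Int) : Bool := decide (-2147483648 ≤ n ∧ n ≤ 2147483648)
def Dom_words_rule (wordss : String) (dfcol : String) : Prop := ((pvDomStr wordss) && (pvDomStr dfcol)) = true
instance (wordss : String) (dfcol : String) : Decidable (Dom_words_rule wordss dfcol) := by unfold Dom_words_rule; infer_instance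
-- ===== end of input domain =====

-- B replaces A's stateful accumulator loop (early returns, running last position) by a
-- stateless characterization: reject if any negated word occurs, accept iff the positive
-- positions equal sorted(set(itself)) and contain no -1; objective: simpler.

-- ===== PORT A =====
def find_word (sstr : String) (wword : String) : Int :=
  if PySem.Str.isIn "_" wword then
    PySem.Str.find sstr (PySem.Str.slice wword (some 1) none)
  else
    PySem.Str.find sstr wword

-- the 'for wor, posi in zip(...)' loop of A, state nn, early returns as results
def wordsLoopA : List (String × Int) → Int → Int
  | [], _ => 1
  | (wor, posi) :: rest, nn =>
    if PySem.Str.isIn "_" wor ∧ posi ≠ -1 then 0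
    else if ¬ PySem.Str.isIn "_" wor then
      if nn < posi then wordsLoopA rest posi else 0
    else wordsLoopA rest nn

def words_rule (wordss : String) (dfcol : String) : Int :=
  let word_sp_col := (PySem.Str.split? dfcol "-").getD []
  let word_sp_find := word_sp_col.map (fun i => find_word wordss i)
  wordsLoopA (word_sp_col.zip word_sp_find) (-1)

-- ===== PORT B =====
def words_rule_alt (wordss : String) (dfcol : String) : Int :=
  let tokens := (PySem.Str.split? dfcol "-").getD []
  if tokens.any (fun t => PySem.Str.isIn "_" t
      && decide (PySem.Str.find wordss (PySem.Str.slice t (some 1) none) ≠ -1)) then 0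
  else
    let pos := (tokens.filter (fun t => !PySem.Str.isIn "_" t)).map
      (fun t => PySem.Str.find wordss t)
    if pos = PySem.List.sorted (PySem.Set.ofList pos) (fun x => x) false
        ∧ (-1 : Int) ∉ pos then 1 else 0

-- ===== PRECONDITION & SPEC =====
def Spec_words_rule (wordss : String) (dfcol : String) (out : Int) : Prop := out = words_rule_alt wordss dfcol
instance (wordss : String) (dfcol : String) (out : Int) : Decidable (Spec_words_rule wordss dfcol out) := by unfold Spec_words_rule; infer_instance

-- ===== CLAIM (what is proved, stated in full; the proofs are below) =====
def Claim_equal_words_rule : Prop := ∀ (wordss : String) (dfcol : String), Dom_words_rule wordss dfcol → Spec_words_rule wordss dfcol (words_rule wordss dfcol)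

-- ===== LEMMAS AND PROOFS =====

-- proof-side description of A's accumulator check: strictly increasing above nn
def chainB : Int → List Int → Bool
  | _, [] => true
  | nn, p :: ps => decide (nn < p) && chainB p ps

theorem chainB_iff_pairwise (nn : Int) (ps : List Int) :
    chainB nn ps = true ↔ (nn :: ps).Pairwise (· < ·) := by
  induction ps generalizing nn with
  | nil => simp [chainB]
  | cons p ps ih =>
    simp only [chainB, Bool.and_eq_true, decide_eq_true_eq, ih, List.pairwise_cons,
      List.mem_cons]
    constructor
    · rintro ⟨h1, h2, h3⟩
      refine ⟨fun x hx => ?_, h2, h3⟩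
      rcases hx with rfl | hx
      · exact h1
      · exact h1.trans (h2 x hx)
    · rintro ⟨h1, h2, h3⟩
      exact ⟨h1 p (Or.inl rfl), h2, h3⟩

-- A's loop, rephrased: any occurring negated word gives 0, otherwise the chain check decides
theorem loopA_eq (wordss : String) (toks : List String) (nn : Int) :
    wordsLoopA (toks.zip (toks.map (fun i => find_word wordss i))) nn
      = if toks.any (fun t => PySem.Str.isIn "_" t
            && decide (PySem.Str.find wordss (PySem.Str.slice t (some 1) none) ≠ -1)) then 0
        else if chainB nn ((toks.filter (fun t => !PySem.Str.isIn "_" t)).map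
            (fun t => PySem.Str.find wordss t)) then 1 else 0 := by
  induction toks generalizing nn with
  | nil => simp [wordsLoopA, chainB]
  | cons t rest ih =>
    rw [List.map_cons, List.zip_cons_cons, List.any_cons, List.filter_cons]
    by_cases h : PySem.Str.isIn "_" t = true
    · have hfw : find_word wordss t
          = PySem.Str.find wordss (PySem.Str.slice t (some 1) none) := by
        simp only [find_word, if_pos h]
      by_cases hf : PySem.Str.find wordss (PySem.Str.slice t (some 1) none) = -1
      · have hnb : (PySem.Str.isIn "_" t
            && decide (PySem.Str.find wordss (PySem.Str.slice t (some 1) none) ≠ -1))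
              = false := by rw [hf]; simp
        have hg : (!PySem.Str.isIn "_" t) = false := by rw [h, Bool.not_true]
        rw [hnb, Bool.false_or, hg, if_neg Bool.false_ne_true]
        simp only [wordsLoopA]
        rw [if_neg (fun hc => hc.2 (hfw ▸ hf)), if_neg (not_not_intro h)]
        exact ih nn
      · have hnb : (PySem.Str.isIn "_" t
            && decide (PySem.Str.find wordss (PySem.Str.slice t (some 1) none) ≠ -1))
              = true := by rw [h]; simpa using hf
        rw [hnb, Bool.true_or]
        simp only [wordsLoopA]
        rw [if_pos ⟨h, hfw ▸ hf⟩]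
        simp
    · have hIs : PySem.Str.isIn "_" t = false := (Bool.not_eq_true _).mp h
      have hfw : find_word wordss t = PySem.Str.find wordss t := by
        simp only [find_word, if_neg h]
      rw [hIs, Bool.false_and, Bool.false_or, Bool.not_false, if_pos rfl, List.map_cons]
      simp only [wordsLoopA]
      rw [if_neg (fun hc => h hc.1), if_pos h, hfw]
      by_cases hlt : nn < PySem.Str.find wordss t
      · rw [if_pos hlt, ih (PySem.Str.find wordss t)]
        refine if_congr Iff.rfl rfl (if_congr ?_ rfl rfl)
        have hlt' := hlt
        simp only [PySem.Str.find_eq] at hlt'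
        simp [chainB, hlt']
      · rw [if_neg hlt]
        by_cases ha : (rest.any fun t => PySem.Str.isIn "_" t
            && decide (PySem.Str.find wordss (PySem.Str.slice t (some 1) none) ≠ -1)) = true
        · rw [if_pos ha]
        · have hlt' := hlt
          simp only [PySem.Str.find_eq] at hlt'
          rw [if_neg ha, if_neg (by simp [chainB, hlt'])]

-- the chain check from -1 equals B's sorted-set/no-(-1) characterization,
-- given that every position is ≥ -1 (true of every find result)
theorem chain_iff_sortedset (pos : List Int) (hge : ∀ p ∈ pos, (-1 : Int) ≤ p) :
    chainB (-1) pos = true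
      ↔ pos = PySem.List.sorted (PySem.Set.ofList pos) (fun x => x) false
          ∧ (-1 : Int) ∉ pos := by
  rw [chainB_iff_pairwise, List.pairwise_cons]
  constructor
  · rintro ⟨hhead, hpw⟩
    have hnd : pos.Nodup := hpw.imp (fun h => ne_of_lt h)
    have hof : PySem.Set.ofList pos = pos := PySem.Set.ofList_eq_self_of_nodup pos hnd
    refine ⟨?_, fun hm => absurd rfl (ne_of_lt (hhead _ hm))⟩
    rw [PySem.List.sorted_eq_of_perm_of_pairwise_lt _ pos _ (by rw [hof]) hpw]
  · rintro ⟨heq, hnm⟩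
    have hpw : pos.Pairwise (· < ·) := by
      rw [heq]; exact PySem.List.sorted_ofList_pairwise_lt pos
    exact ⟨fun p hp => lt_of_le_of_ne (hge p hp) (fun hh => hnm (hh ▸ hp)), hpw⟩

theorem find_ge (wordss t : String) : (-1 : Int) ≤ PySem.Str.find wordss t := by
  simp only [PySem.Str.find_eq]
  exact PySem.Chars.neg_one_le_find _ _

-- ===== VERDICT (by name: the statement is the Claim_ definition above) =====
theorem words_rule_spec : Claim_equal_words_rule := by
  intro wordss dfcol _
  unfold Spec_words_rule
  simp only [words_rule, words_rule_alt]
  rw [loopA_eq]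
  by_cases hneg : ((PySem.Str.split? dfcol "-").getD []).any (fun t => PySem.Str.isIn "_" t
      && decide (PySem.Str.find wordss (PySem.Str.slice t (some 1) none) ≠ -1)) = true
  · rw [if_pos hneg, if_pos hneg]
  · rw [if_neg hneg, if_neg hneg]
    have hge : ∀ p ∈ (((PySem.Str.split? dfcol "-").getD []).filter
        (fun t => !PySem.Str.isIn "_" t)).map (fun t => PySem.Str.find wordss t),
        (-1 : Int) ≤ p := by
      intro p hp
      obtain ⟨t, _, rfl⟩ := List.mem_map.mp hp
      exact find_ge wordss t
    exact if_congr (chain_iff_sortedset _ hge) rfl rfl
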